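-- pv_equiv track=rewrite | github.com/tumuum/prog-book | code/flag-example.py | check
-- ===== SOURCE A (Python) =====
-- def check(in_str):
-- 	"""Checks whether the string consists of a's and b's
-- 	without more than 3 consecutive a's"""
--
-- 	accept=True #flag for accept/reject status
-- 	a_count = 0 #counter for cons a's
--
-- 	for c in in_str:
-- 		if c == 'a':
-- 			a_count += 1
-- 		elif c == 'b':
-- 			a_count = 0
-- 		else:
-- 			#reject if any sym not a or b
-- 			accept = False
--
-- 		if a_count > 3:
-- 			#reject if more than 3 cons a's
-- 			accept = False
--
-- 	return accept
-- ===== SOURCE B (Python) =====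
-- def check(in_str):
--     """Checks whether the string consists of a's and b's
--     without more than 3 consecutive a's"""
--     return set(in_str) <= {'a', 'b'} and 'aaaa' not in in_str
-- ===== Notes on version B (the rewrite author's own statement) =====
-- stated objective: simpler
-- what changed: Replaces the stateful single pass (accept flag + running a-counter) by the conjunction of two independent whole-string tests: alphabet check via set subset and run check via substring absence.
import Mathlib
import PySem

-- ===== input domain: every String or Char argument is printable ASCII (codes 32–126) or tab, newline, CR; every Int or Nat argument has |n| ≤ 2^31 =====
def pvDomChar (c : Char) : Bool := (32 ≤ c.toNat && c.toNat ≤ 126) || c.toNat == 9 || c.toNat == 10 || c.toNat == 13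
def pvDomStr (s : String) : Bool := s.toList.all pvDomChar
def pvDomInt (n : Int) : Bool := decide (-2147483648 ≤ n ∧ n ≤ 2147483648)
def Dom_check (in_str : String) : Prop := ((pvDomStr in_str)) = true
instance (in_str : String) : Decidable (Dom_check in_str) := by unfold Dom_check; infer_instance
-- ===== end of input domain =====

-- B replaces A's stateful single pass (accept flag + running a-counter) by two
-- independent whole-string tests: alphabet ⊆ {a,b} and no 'aaaa' substring (objective: simpler).

-- ===== PORT A =====
-- the loop body of A: update (accept, a_count) for one character, then the a_count > 3 reset
def checkStep (st : Bool × Int) (c : Char) : Bool × Int :=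
  let st' :=
    if c == 'a' then (st.1, st.2 + 1)
    else if c == 'b' then (st.1, (0 : Int))
    else (false, st.2)
  if st'.2 > 3 then (false, st'.2) else st'

def check (in_str : String) : Bool :=
  (in_str.toList.foldl checkStep (true, (0 : Int))).1

-- ===== PORT B =====
def check_alt (in_str : String) : Bool :=
  (PySem.Set.ofList in_str.toList).all (fun c => c == 'a' || c == 'b')
    && !(PySem.Str.isIn "aaaa" in_str)

-- ===== PRECONDITION & SPEC =====
def Spec_check (in_str : String) (out : Bool) : Prop := out = check_alt in_str
instance (in_str : String) (out : Bool) : Decidable (Spec_check in_str out) := by unfold Spec_check; infer_instance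

-- ===== CLAIM (what is proved, stated in full; the proofs are below) =====
def Claim_equal_check : Prop := ∀ (in_str : String), Dom_check in_str → Spec_check in_str (check in_str)

-- ===== LEMMAS AND PROOFS =====

-- proof-side helpers
def isAB (c : Char) : Bool := c == 'a' || c == 'b'

-- run validity of A's counter along the string, starting from counter k
def goodI (k : Int) : List Char → Bool
  | [] => true
  | c :: l =>
      let k' := if c == 'a' then k + 1 else if c == 'b' then (0 : Int) else k
      decide (k' ≤ 3) && goodI k' l

def bad (l : List Char) : Bool := PySem.Chars.isIn ['a','a','a','a'] l

theorem fold_check_eq (l : List Char) : ∀ (acc : Bool) (k : Int),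
    (l.foldl checkStep (acc, k)).1 = (acc && l.all isAB && goodI k l) := by
  induction l with
  | nil => intro acc k; simp [goodI]
  | cons c l ih =>
      intro acc k
      by_cases ha : c = 'a'
      · subst ha
        by_cases h3 : (k + 1 : Int) ≤ 3
        · simp [checkStep, List.foldl_cons, ih, goodI, isAB, h3, not_lt.mpr h3,
            Bool.and_assoc]
        · have h4 : (3 : Int) < k + 1 := lt_of_not_ge h3
          simp [checkStep, List.foldl_cons, ih, goodI, isAB, h3, h4]
      · by_cases hb : c = 'b'
        · subst hb
          simp [checkStep, List.foldl_cons, ih, goodI, isAB, Bool.and_assoc]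
        · by_cases h3 : (k : Int) ≤ 3
          · simp [checkStep, List.foldl_cons, ih, goodI, isAB, ha, hb, h3, not_lt.mpr h3]
          · simp [checkStep, List.foldl_cons, ih, goodI, isAB, ha, hb, h3, lt_of_not_ge h3]

theorem bad_cons (c : Char) (l : List Char) :
    bad (c :: l) = (decide (['a','a','a','a'] <+: (c :: l)) || bad l) := by
  rw [Bool.eq_iff_iff]
  simp only [Bool.or_eq_true, decide_eq_true_eq, bad,
    ← PySem.Chars.exists_prefix_drop_iff_isIn]
  constructor
  · rintro ⟨j, h⟩
    cases j with
    | zero => exact Or.inl h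
    | succ j => exact Or.inr ⟨j, by simpa using h⟩
  · rintro (h | ⟨j, h⟩)
    · exact ⟨0, h⟩
    · exact ⟨j + 1, by simpa using h⟩

theorem bad_b_cross (n : Nat) (hn : n ≤ 3) (l : List Char) :
    bad (List.replicate n 'a' ++ 'b' :: l) = bad l := by
  interval_cases n <;>
    · simp only [List.replicate_succ, List.replicate_zero, List.cons_append,
        List.nil_append, bad_cons]
      simp [List.cons_prefix_cons]

theorem bad_rep (n : Nat) (hn : n ≤ 3) : bad (List.replicate n 'a') = false := by
  interval_cases n <;> decide

theorem main_lemma (l : List Char) : ∀ (k : Int), 0 ≤ k → k ≤ 3 →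
    (l.all isAB && goodI k l) = (l.all isAB && !bad (List.replicate k.toNat 'a' ++ l)) := by
  induction l with
  | nil =>
      intro k h0 h3
      have : k.toNat ≤ 3 := by omega
      simp [goodI, bad_rep k.toNat this]
  | cons c l ih =>
      intro k h0 h3
      by_cases ha : c = 'a'
      · subst ha
        by_cases hk : (k + 1 : Int) ≤ 3
        · have hrep : List.replicate k.toNat 'a' ++ 'a' :: l
              = List.replicate (k + 1).toNat 'a' ++ l := by
            have : (k + 1).toNat = k.toNat + 1 := by omega
            rw [this, List.replicate_succ', List.append_assoc]
            rfl
          rw [hrep]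
          simp only [goodI, List.all_cons]
          have := ih (k + 1) (by omega) hk
          simpa [isAB, hk, Bool.and_assoc] using this
        · -- k = 3: counter overflows; the replicate side contains 'aaaa' as a prefix
          have hk3 : k = 3 := by omega
          subst hk3
          have hbb : bad ('a' :: 'a' :: 'a' :: 'a' :: l) = true := by
            rw [bad, ← PySem.Chars.exists_prefix_drop_iff_isIn]
            exact ⟨0, by simp [List.cons_prefix_cons]⟩
          have hrep : List.replicate (3 : Int).toNat 'a' ++ 'a' :: l
              = 'a' :: 'a' :: 'a' :: 'a' :: l := by
            have h33 : (3 : Int).toNat = 3 := rfl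
            rw [h33]
            rfl
          rw [hrep]
          simp [goodI, hbb]
      · by_cases hb : c = 'b'
        · subst hb
          have hcross : bad (List.replicate k.toNat 'a' ++ 'b' :: l) = bad l :=
            bad_b_cross k.toNat (by omega) l
          rw [hcross]
          simp only [goodI, List.all_cons]
          have := ih 0 le_rfl (by norm_num)
          simpa [isAB, Bool.and_assoc] using this
        · have hc : (c == 'a' || c == 'b') = false := by
            simp [ha, hb]
          simp [isAB, List.all_cons, hc]

theorem set_all_eq (l : List Char) (p : Char → Bool) :
    (PySem.Set.ofList l).all p = l.all p := by
  rw [Bool.eq_iff_iff]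
  simp only [List.all_eq_true]
  constructor
  · intro h x hx; exact h x ((PySem.Set.mem_ofList _ _).mpr hx)
  · intro h x hx; exact h x ((PySem.Set.mem_ofList _ _).mp hx)

theorem check_eq_alt (s : String) : check s = check_alt s := by
  unfold check check_alt
  rw [set_all_eq, fold_check_eq, Bool.true_and]
  have : PySem.Str.isIn "aaaa" s = bad s.toList := by
    simp [PySem.Str.isIn_eq, bad]
  rw [this]
  have := main_lemma s.toList 0 le_rfl (by norm_num)
  simpa [isAB] using this

-- ===== VERDICT (by name: the statement is the Claim_ definition above) =====
theorem check_spec : Claim_equal_check := by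
  intro s _
  unfold Spec_check
  exact check_eq_alt s
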